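-- pv_equiv track=rewrite | github.com/g1879/DrissionPage | _functions/locator.py | _quotes_escape
-- ===== SOURCE A (Python) =====
-- def _quotes_escape(search_str: str) -> str:
--     """将"转义，不知何故不能直接用 斜杠 来转义
--     :param search_str: 查询字符串
--     :return: 把"转义后的字符串
--     """
--     if '"' not in search_str:
--         return f'"{search_str}"'
--
--     parts = search_str.split('"')
--     parts_num = len(parts)
--     search_str = 'concat('
--
--     for key, i in enumerate(parts):
--         search_str += f'"{i}"'
--         search_str += ',' + '\'"\',' if key < parts_num - 1 else ''
--
--     search_str += ',"")'
--     return search_str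
-- ===== SOURCE B (Python) =====
-- def _quotes_escape(search_str: str) -> str:
--     """Escape double quotes into an XPath concat() expression."""
--     if '"' not in search_str:
--         return f'"{search_str}"'
--     return 'concat("' + search_str.replace('"', '",\'"\',"') + '","")'
-- ===== Notes on version B (the rewrite author's own statement) =====
-- stated objective: simpler
-- what changed: B drops the split/enumerate/accumulate loop of A: it builds the quoted case with a single str.replace that turns every double-quote character into the concat() delimiter and wraps the result once.
import Mathlib
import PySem

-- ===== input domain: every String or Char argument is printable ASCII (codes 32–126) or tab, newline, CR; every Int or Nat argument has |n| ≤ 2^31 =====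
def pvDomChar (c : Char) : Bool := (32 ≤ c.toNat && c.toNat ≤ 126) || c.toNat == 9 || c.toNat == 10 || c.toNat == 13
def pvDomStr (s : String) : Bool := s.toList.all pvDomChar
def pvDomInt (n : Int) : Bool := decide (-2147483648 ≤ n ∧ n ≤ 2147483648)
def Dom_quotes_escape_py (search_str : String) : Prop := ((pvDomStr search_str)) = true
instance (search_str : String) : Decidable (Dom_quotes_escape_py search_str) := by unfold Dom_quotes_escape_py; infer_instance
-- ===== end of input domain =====

-- B replaces A's split-then-accumulate loop by one str.replace plus fixed wrapping; objective: simpler.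

-- ===== PORT A =====
def quotes_escape_py (search_str : String) : String :=
  if PySem.Str.isIn "\"" search_str = false then
    "\"" ++ search_str ++ "\""
  else
    let parts : List String := (PySem.Str.split? search_str "\"").getD []
    let parts_num : Int := parts.length
    let s0 : String := "concat("
    let s1 : String := (PySem.List.enumerate parts).foldl
      (fun acc ki =>
        let acc := acc ++ "\"" ++ ki.2 ++ "\""
        acc ++ (if ki.1 < parts_num - 1 then ",'\"'," else "")) s0
    s1 ++ ",\"\")"

-- ===== PORT B =====
def quotes_escape_py_alt (search_str : String) : String :=
  if PySem.Str.isIn "\"" search_str = false then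
    "\"" ++ search_str ++ "\""
  else
    "concat(\"" ++ PySem.Str.replace search_str "\"" "\",'\"',\"" ++ "\",\"\")"

-- ===== PRECONDITION & SPEC =====
def Spec_quotes_escape_py (search_str : String) (out : String) : Prop := out = quotes_escape_py_alt search_str
instance (search_str : String) (out : String) : Decidable (Spec_quotes_escape_py search_str out) := by unfold Spec_quotes_escape_py; infer_instance

-- ===== CLAIM (what is proved, stated in full; the proofs are below) =====
def Claim_equal_quotes_escape_py : Prop := ∀ (search_str : String), Dom_quotes_escape_py search_str → Spec_quotes_escape_py search_str (quotes_escape_py search_str)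

-- ===== LEMMAS AND PROOFS =====

-- Proof-side structural versions of Chars.splitOn / Chars.replace for a one-char separator.
def pvSplit1 (c : Char) : List Char → List Char → List (List Char)
  | [], cur => [cur.reverse]
  | x :: t, cur => if x = c then cur.reverse :: pvSplit1 c t [] else pvSplit1 c t (x :: cur)

def pvRep1 (c : Char) (new : List Char) : List Char → List Char
  | [] => []
  | x :: t => if x = c then new ++ pvRep1 c new t else x :: pvRep1 c new t

theorem pvSplit1_ne_nil (c : Char) (l cur : List Char) : pvSplit1 c l cur ≠ [] := by
  induction l generalizing cur with
  | nil => simp [pvSplit1]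
  | cons x t ih => by_cases h : x = c <;> simp [pvSplit1, h, ih]

theorem splitOn_go_eq (c : Char) (l : List Char) : ∀ (fuel : Nat), l.length ≤ fuel →
    ∀ (cur acc : List Char) (accs : List (List Char)),
    PySem.Chars.splitOn.go [c] fuel l cur accs = accs.reverse ++ pvSplit1 c l cur := by
  induction l with
  | nil =>
    intro fuel _ cur acc accs
    cases fuel <;> simp [PySem.Chars.splitOn.go, pvSplit1]
  | cons x t ih =>
    intro fuel hf cur acc accs
    cases fuel with
    | zero => simp at hf
    | succ fuel =>
      simp only [List.length_cons, Nat.succ_le_succ_iff] at hf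
      by_cases h : x = c
      · subst h
        simp only [PySem.Chars.splitOn.go, List.isPrefixOf, beq_self_eq_true, Bool.true_and,
          if_true, List.length_cons, List.drop_succ_cons]
        simp only [List.length_nil, List.drop_zero]
        rw [ih fuel hf [] acc (cur.reverse :: accs)]
        simp [pvSplit1]
      · have hpre : ([c].isPrefixOf (x :: t)) = false := by
          simp [List.isPrefixOf]; exact fun hc => (h hc.symm).elim
        simp only [PySem.Chars.splitOn.go, hpre, if_neg, Bool.false_eq_true, not_false_iff]
        rw [ih fuel hf (x :: cur) acc accs]
        simp [pvSplit1, h]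

theorem replace_go_eq (c : Char) (new : List Char) (l : List Char) : ∀ (fuel : Nat),
    l.length ≤ fuel → ∀ (acc : List Char),
    PySem.Chars.replace.go [c] new fuel l acc = acc.reverse ++ pvRep1 c new l := by
  induction l with
  | nil =>
    intro fuel _ acc
    cases fuel <;> simp [PySem.Chars.replace.go, pvRep1]
  | cons x t ih =>
    intro fuel hf acc
    cases fuel with
    | zero => simp at hf
    | succ fuel =>
      simp only [List.length_cons, Nat.succ_le_succ_iff] at hf
      by_cases h : x = c
      · subst h
        simp only [PySem.Chars.replace.go, List.isPrefixOf, beq_self_eq_true, Bool.true_and,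
          if_true, List.length_cons, List.drop_succ_cons]
        simp only [List.length_nil, List.drop_zero]
        rw [ih fuel hf (new.reverse ++ acc)]
        simp [pvRep1]
      · have hpre : ([c].isPrefixOf (x :: t)) = false := by
          simp [List.isPrefixOf]; exact fun hc => (h hc.symm).elim
        simp only [PySem.Chars.replace.go, hpre, if_neg, Bool.false_eq_true, not_false_iff]
        rw [ih fuel hf (x :: acc)]
        simp [pvRep1, h]

theorem splitOn_eq (c : Char) (l : List Char) :
    PySem.Chars.splitOn l [c] = pvSplit1 c l [] := by
  have := splitOn_go_eq c l (l.length + 1) (by omega) [] [] []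
  simpa [PySem.Chars.splitOn] using this

theorem replace_eq (c : Char) (new l : List Char) :
    PySem.Chars.replace l [c] new = pvRep1 c new l := by
  have := replace_go_eq c new l l.length (le_refl _) []
  simpa [PySem.Chars.replace] using this

-- the body "p0","…","p1"… produced by A's loop, as a function of the parts
def pvBody : List (List Char) → List Char
  | [] => []
  | p :: rest =>
      ('"' :: p ++ ['"']) ++ (if rest = [] then [] else [',', '\'', '"', '\'', ','] ++ pvBody rest)

theorem body_split_eq_rep (l cur : List Char) :
    pvBody (pvSplit1 '"' l cur) =
      '"' :: cur.reverse ++ pvRep1 '"' ['"', ',', '\'', '"', '\'', ',', '"'] l ++ ['"'] := by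
  induction l generalizing cur with
  | nil => simp [pvSplit1, pvBody, pvRep1]
  | cons x t ih =>
    by_cases h : x = '"'
    · have hne := pvSplit1_ne_nil '"' t []
      simp only [pvSplit1, if_pos h]
      rw [pvBody, if_neg hne, ih]
      simp [h, pvRep1]
    · simp only [pvSplit1, if_neg h, ih, pvRep1, if_neg h]
      simp

-- A's enumerate-fold, reduced to pvBody (start index driven by the total count n)
theorem fold_eq (n : Int) (L : List String) : ∀ (start : Int) (acc : String),
    start + L.length = n →
    ((PySem.List.enumerate L start).foldl
      (fun acc ki =>
        let acc := acc ++ "\"" ++ ki.2 ++ "\""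
        acc ++ (if ki.1 < n - 1 then ",'\"'," else "")) acc).toList
    = acc.toList ++ pvBody (L.map String.toList) := by
  induction L with
  | nil => intro start acc _; simp [PySem.List.enumerate, pvBody]
  | cons p rest ih =>
    intro start acc hn
    simp only [List.length_cons] at hn
    rw [PySem.List.enumerate]
    simp only [List.foldl_cons]
    rw [ih (start + 1) _ (by push_cast; push_cast at hn; omega)]
    rcases Decidable.em (rest = []) with hr | hr
    · subst hr
      have : ¬ (start < n - 1) := by simp at hn; omega
      simp [this, pvBody]
    · have hlen : (0 : Int) < rest.length := by
        exact_mod_cast List.length_pos_iff.mpr hr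
      have hlt : start < n - 1 := by omega
      have hmapne : rest.map String.toList ≠ [] := by simpa using hr
      simp only [hlt, if_pos, List.map_cons, pvBody, if_neg hmapne]
      simp

theorem split?_quote (s : String) :
    (PySem.Str.split? s "\"").getD [] = (PySem.Chars.splitOn s.toList ['"']).map String.ofList := by
  rw [PySem.Str.split?]
  simp [PySem.Chars.split?]

-- ===== VERDICT (by name: the statement is the Claim_ definition above) =====
theorem quotes_escape_py_spec : Claim_equal_quotes_escape_py := by
  intro s _
  unfold Spec_quotes_escape_py quotes_escape_py quotes_escape_py_alt
  by_cases h : PySem.Str.isIn "\"" s = false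
  · rw [if_pos h, if_pos h]
  · rw [if_neg h, if_neg h]
    rw [← String.toList_inj]
    have hfold := fold_eq (((PySem.Str.split? s "\"").getD []).length : Int)
      ((PySem.Str.split? s "\"").getD []) 0 "concat(" (by simp)
    simp only [String.toList_append, PySem.Str.toList_replace]
    rw [hfold, split?_quote]
    have hmap : ((PySem.Chars.splitOn s.toList ['"']).map String.ofList).map String.toList
        = PySem.Chars.splitOn s.toList ['"'] := by
      simp [List.map_map, Function.comp_def]
    have h3 : ("\"" : String).toList = ['"'] := by decide
    have h4 : ("\",'\"',\"" : String).toList = ['"', ',', '\'', '"', '\'', ',', '"'] := by decide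
    rw [hmap, splitOn_eq, h3, h4, replace_eq, body_split_eq_rep]
    have h1 : ("concat(\"" : String).toList = ("concat(" : String).toList ++ ['"'] := by decide
    have h2 : ("\",\"\")" : String).toList = ['"'] ++ (",\"\")" : String).toList := by decide
    rw [h1, h2]
    simp
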